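-- pv_equiv track=rewrite | github.com/ArkadebMisra/jadavpur | sem2/python/assignment1/Q9.py | func
-- ===== SOURCE A (Python) =====
-- def func(ele):
--     s = ele[0]  # Subject name
--     st = ele[1] # List of students
--     m = ele[2]  # Marks for the subject
--     highest = max(m)  # Find the highest mark
--     idx = 0  # Initialize index for the highest mark
--     for i in range(len(m)):
--         if m[i] == highest:
--             # Get the index of the highest mark
--             idx = i
--             break
--     # Return the subject, student, and highest mark
--     return s, st[idx], m[idx]
-- ===== SOURCE B (Python) =====
-- def func(ele):
--     s = ele[0]
--     st = ele[1]
--     m = ele[2]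
--     # scan BACK-TO-FRONT carrying the running best; '>=' ties toward the
--     # smaller index, so the first occurrence of the maximum wins
--     best_i = len(m) - 1
--     best_v = m[best_i]
--     for i in range(len(m) - 2, -1, -1):
--         if m[i] >= best_v:
--             best_i, best_v = i, m[i]
--     return s, st[best_i], best_v
-- ===== Notes on version B (the rewrite author's own statement) =====
-- stated objective: alternative
-- what changed: A computes max(m) and then a second forward loop to find its first index; B makes a single backwards scan carrying (best index, best value), using >= so ties resolve to the smaller index, and returns the carried value instead of re-indexing m.
import Mathlib
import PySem

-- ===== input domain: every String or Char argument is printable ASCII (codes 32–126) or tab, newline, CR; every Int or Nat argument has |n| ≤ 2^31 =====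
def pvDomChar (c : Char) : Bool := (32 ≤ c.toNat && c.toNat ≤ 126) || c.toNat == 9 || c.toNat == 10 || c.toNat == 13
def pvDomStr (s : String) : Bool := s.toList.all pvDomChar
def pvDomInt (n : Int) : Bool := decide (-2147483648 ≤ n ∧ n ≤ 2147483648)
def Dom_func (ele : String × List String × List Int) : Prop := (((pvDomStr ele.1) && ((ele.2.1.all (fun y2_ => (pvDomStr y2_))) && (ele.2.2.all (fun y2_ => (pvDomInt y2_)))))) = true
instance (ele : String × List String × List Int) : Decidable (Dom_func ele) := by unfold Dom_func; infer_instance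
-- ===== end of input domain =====

-- B replaces A's two stages (max(m), then a forward first-index scan) by ONE backwards scan
-- carrying (best index, best value) and returning the carried value; same cost, different decomposition.

-- ===== PORT A =====
-- the 'for i in range(len(m)): if m[i] == highest: idx = i; break' loop,
-- scanning forwards with the running absolute index i (idx stays 0 if no match)
def scanA (h : Int) : List Int → Int → Int
  | [], _ => 0
  | x :: xs, i => if x = h then i else scanA h xs (i + 1)

def func (ele : String × List String × List Int) : String × String × Int :=
  let s := ele.1
  let st := ele.2.1
  let m := ele.2.2
  let highest := (PySem.List.max? m (fun y => y)).getD 0   -- max(m); Pre_ excludes m = [] (ValueError)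
  let idx := scanA highest m 0
  (s, (PySem.List.pyGet? st idx).getD "",                   -- st[idx]; Pre_ excludes IndexError
      (PySem.List.pyGet? m idx).getD 0)

-- ===== PORT B =====
-- the backwards loop 'for i in range(len(m)-2, -1, -1): if m[i] >= best_v: ...' as the obvious
-- structural recursion: the recursive call yields the state after the higher indices, then the
-- head (the current, smaller index) updates it with '>=' (ties go to the smaller index)
def scanB : List Int → Int → Int × Int
  | [], i => (i, 0)                 -- unreachable: m ≠ [] under Pre_ (m[-1] is IndexError there)
  | [x], i => (i, x)                -- initial state: best_i = len(m)-1, best_v = m[-1]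
  | x :: y :: ys, i =>
    let bb := scanB (y :: ys) (i + 1)
    if x ≥ bb.2 then (i, x) else bb

def func_alt (ele : String × List String × List Int) : String × String × Int :=
  let s := ele.1
  let st := ele.2.1
  let m := ele.2.2
  let bb := scanB m 0
  (s, (PySem.List.pyGet? st bb.1).getD "",                  -- st[best_i]; Pre_ excludes IndexError
      bb.2)                                                 -- best_v, carried — no second lookup

-- ===== PRECONDITION & SPEC =====
-- Pre_ excludes exactly the inputs where the Pythons raise: empty mark list (ValueError in A,
-- IndexError in B), and a first-argmax index beyond the student list (IndexError in both).
def Pre_func (ele : String × List String × List Int) : Prop :=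
  ele.2.2 ≠ [] ∧
  (ele.2.2.findIdx (fun y => y = ele.2.2.foldl max (ele.2.2.headD 0))) < ele.2.1.length
instance (ele : String × List String × List Int) : Decidable (Pre_func ele) := by
  unfold Pre_func; infer_instance

def pvWitness_func : (String × List String × List Int) := ("math", ["ann", "bob"], [4, 7])

def Spec_func (ele : String × List String × List Int) (out : String × String × Int) : Prop := out = func_alt ele
instance (ele : String × List String × List Int) (out : String × String × Int) : Decidable (Spec_func ele out) := by unfold Spec_func; infer_instance

-- ===== CLAIM (what is proved, stated in full; the proofs are below) =====
def Claim_equal_func : Prop := ∀ (ele : String × List String × List Int), Dom_func ele → Pre_func ele → Spec_func ele (func ele)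

-- ===== LEMMAS AND PROOFS =====

theorem foldl_max_shift (ys : List Int) : ∀ a b : Int,
    ys.foldl max (max a b) = max a (ys.foldl max b) := by
  induction ys with
  | nil => intro a b; rfl
  | cons c ys ih =>
    intro a b
    simp only [List.foldl_cons, max_assoc, ih]

-- B's backwards scan returns (A's first-max index, the maximum)
theorem scanB_eq (xs : List Int) : ∀ (x i : Int),
    scanB (x :: xs) i = (scanA (xs.foldl max x) (x :: xs) i, xs.foldl max x) := by
  induction xs with
  | nil => intro x i; simp [scanB, scanA]
  | cons y ys ih =>
    intro x i
    have hM : (y :: ys).foldl max x = max x (ys.foldl max y) := by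
      simpa using foldl_max_shift ys x y
    by_cases hx : x ≥ ys.foldl max y
    · have h1 : max x (ys.foldl max y) = x := max_eq_left hx
      simp [scanB, ih, hx, hM, scanA]
    · have h1 : max x (ys.foldl max y) = ys.foldl max y := max_eq_right (by omega)
      have hne : ¬ (x = ys.foldl max y) := by omega
      simp [scanB, ih, hx, hM, h1, scanA, hne]

-- A's scan lands on an index holding the searched value, when the value occurs
theorem scanA_spec (h : Int) : ∀ (l : List Int) (i : Int), h ∈ l →
    ∃ j : Nat, scanA h l i = i + (j : Int) ∧ l[j]? = some h := by
  intro l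
  induction l with
  | nil => intro i hi; cases hi
  | cons x xs ih =>
    intro i hmem
    by_cases hx : x = h
    · exact ⟨0, by simp [scanA, hx]⟩
    · have hxs : h ∈ xs := by
        rcases List.mem_cons.mp hmem with h1 | h1
        · exact absurd h1.symm hx
        · exact h1
      obtain ⟨j, hj1, hj2⟩ := ih (i + 1) hxs
      exact ⟨j + 1, by simp [scanA, hx, hj1]; ring, by simpa using hj2⟩

theorem func_eq_alt (ele : String × List String × List Int) (h : ele.2.2 ≠ []) :
    func ele = func_alt ele := by
  obtain ⟨s, st, m⟩ := ele
  match m with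
  | [] => exact absurd rfl h
  | x :: xs =>
    simp only [func, func_alt, PySem.List.max?_id_cons, Option.getD_some, scanB_eq]
    have hmem : xs.foldl max x ∈ x :: xs := by
      rcases PySem.List.foldl_max_mem xs x with h1 | h1
      · simp [h1]
      · simp [h1]
    obtain ⟨j, hj1, hj2⟩ := scanA_spec (xs.foldl max x) (x :: xs) 0 hmem
    have : PySem.List.pyGet? (x :: xs) (scanA (xs.foldl max x) (x :: xs) 0) =
        some (xs.foldl max x) := by
      rw [hj1]; simpa using hj2
    simp [this]

-- ===== VERDICT (by name: the statement is the Claim_ definition above) =====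
theorem func_spec : Claim_equal_func := by
  intro ele _ hpre
  unfold Spec_func
  exact func_eq_alt ele hpre.1
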